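-- pv_equiv track=rewrite | github.com/cafox2003/cube-method-optimizer | src/core/dsl.py | _parse_free_layers
-- ===== SOURCE A (Python) =====
-- _FREE_LAYER_MOVES = {
--     "U": ["", "U", "U'", "U2"],
--     "D": ["", "D", "D'", "D2"],
--     "R": ["", "R", "R'", "R2"],
--     "L": ["", "L", "L'", "L2"],
--     "F": ["", "F", "F'", "F2"],
--     "B": ["", "B", "B'", "B2"],
-- }
--
-- def _parse_free_layers(raw):
--     layers = []
--     for ch in raw.strip().upper():
--         if ch not in _FREE_LAYER_MOVES:
--             raise ValueError(f"Unknown free layer '{ch}' in free_layer='{raw}'")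
--         moves = _FREE_LAYER_MOVES[ch]
--         if moves not in layers:
--             layers.append(moves)
--     return layers
-- ===== SOURCE B (Python) =====
-- _FREE_LAYER_MOVES = {
--     "U": ["", "U", "U'", "U2"],
--     "D": ["", "D", "D'", "D2"],
--     "R": ["", "R", "R'", "R2"],
--     "L": ["", "L", "L'", "L2"],
--     "F": ["", "F", "F'", "F2"],
--     "B": ["", "B", "B'", "B2"],
-- }
--
-- def _parse_free_layers(raw):
--     chars = raw.strip().upper()
--     for ch in chars:
--         if ch not in _FREE_LAYER_MOVES:
--             raise ValueError(f"Unknown free layer '{ch}' in free_layer='{raw}'")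
--     return [_FREE_LAYER_MOVES[ch] for ch in dict.fromkeys(chars)]
-- ===== Notes on version B (the rewrite author's own statement) =====
-- stated objective: idiomatic
-- what changed: Replaces the single interleaved loop (validate each char + membership-check dedup of moves lists) with a validation pass followed by an order-preserving char dedup via dict.fromkeys and a comprehension building the result; char-dedup equals moves-dedup because each layer char maps to a distinct moves list.
import Mathlib
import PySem

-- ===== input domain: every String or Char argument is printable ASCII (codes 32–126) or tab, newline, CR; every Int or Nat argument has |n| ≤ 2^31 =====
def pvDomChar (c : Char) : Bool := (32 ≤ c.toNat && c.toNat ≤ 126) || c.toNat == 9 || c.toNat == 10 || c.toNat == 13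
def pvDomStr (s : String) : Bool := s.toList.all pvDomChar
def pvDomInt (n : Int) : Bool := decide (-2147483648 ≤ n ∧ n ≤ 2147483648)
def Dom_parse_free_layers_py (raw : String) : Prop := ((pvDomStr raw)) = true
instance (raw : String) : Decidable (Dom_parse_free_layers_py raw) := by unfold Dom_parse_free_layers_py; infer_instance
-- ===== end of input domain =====

-- B: validation pass + order-preserving char dedup (dict.fromkeys) instead of A's interleaved
-- validate-and-membership-dedup loop; same return value (idiomatic decomposition, not a speed claim).

-- shared module-level constant _FREE_LAYER_MOVES
def pvFreeLayerMoves : PySem.Dict String (List String) :=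
  PySem.Dict.ofList
    [ ("U", ["", "U", "U'", "U2"])
    , ("D", ["", "D", "D'", "D2"])
    , ("R", ["", "R", "R'", "R2"])
    , ("L", ["", "L", "L'", "L2"])
    , ("F", ["", "F", "F'", "F2"])
    , ("B", ["", "B", "B'", "B2"]) ]

-- ===== PORT A =====
-- A's loop; 'none' marks the explicit 'raise ValueError' (excluded by Pre_).
def pvLoopA : List Char → List (List String) → Option (List (List String))
  | [], layers => some layers
  | ch :: rest, layers =>
    if pvFreeLayerMoves.contains ch.toString then
      let moves := pvFreeLayerMoves.getD ch.toString []
      pvLoopA rest (if layers.contains moves then layers else layers ++ [moves])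
    else none  -- raise ValueError

def parse_free_layers_py (raw : String) : List (List String) :=
  (pvLoopA (PySem.Str.upper (PySem.Str.strip raw)).toList []).getD []  -- .getD [] unreachable under Pre_

-- ===== PORT B =====
def parse_free_layers_py_alt (raw : String) : List (List String) :=
  let chars := (PySem.Str.upper (PySem.Str.strip raw)).toList
  if chars.all (fun ch => pvFreeLayerMoves.contains ch.toString) then
    (PySem.List.dedup chars).map (fun ch => pvFreeLayerMoves.getD ch.toString [])
  else []  -- raise ValueError (excluded by Pre_)

-- ===== PRECONDITION & SPEC =====
-- Pre_ excludes exactly the inputs on which A raises ValueError: some character of the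
-- stripped, uppercased input is not one of the six face letters.
def Pre_parse_free_layers_py (raw : String) : Prop :=
  ((PySem.Str.upper (PySem.Str.strip raw)).toList.all
    (fun c => c ∈ ['U','D','R','L','F','B'])) = true
instance (raw : String) : Decidable (Pre_parse_free_layers_py raw) := by
  unfold Pre_parse_free_layers_py; infer_instance
def pvWitness_parse_free_layers_py : String := " udU "

def Spec_parse_free_layers_py (raw : String) (out : List (List String)) : Prop :=
  out = parse_free_layers_py_alt raw
instance (raw : String) (out : List (List String)) : Decidable (Spec_parse_free_layers_py raw out) := by
  unfold Spec_parse_free_layers_py; infer_instance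

-- ===== CLAIM (what is proved, stated in full; the proofs are below) =====
def Claim_equal_parse_free_layers_py : Prop := ∀ (raw : String), Dom_parse_free_layers_py raw → Pre_parse_free_layers_py raw → Spec_parse_free_layers_py raw (parse_free_layers_py raw)

-- ===== LEMMAS AND PROOFS =====

theorem pv_contains_of_valid {c : Char} (h : c ∈ ['U','D','R','L','F','B']) :
    pvFreeLayerMoves.contains c.toString = true := by
  fin_cases h <;> decide

theorem pv_inj_of_valid {a b : Char} (ha : a ∈ ['U','D','R','L','F','B'])
    (hb : b ∈ ['U','D','R','L','F','B'])
    (h : pvFreeLayerMoves.getD a.toString [] = pvFreeLayerMoves.getD b.toString []) : a = b := by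
  fin_cases ha <;> fin_cases hb <;> first | rfl | (exfalso; revert h; decide)

theorem pv_loopA_eq (cs : List Char) (seen : List Char)
    (hcs : ∀ c ∈ cs, c ∈ ['U','D','R','L','F','B'])
    (hseen : ∀ c ∈ seen, c ∈ ['U','D','R','L','F','B']) :
    pvLoopA cs (seen.map (fun c => pvFreeLayerMoves.getD c.toString []))
      = some ((cs.foldl PySem.Set.add seen).map (fun c => pvFreeLayerMoves.getD c.toString [])) := by
  induction cs generalizing seen with
  | nil => rfl
  | cons c rest ih =>
    have hc : c ∈ ['U','D','R','L','F','B'] := hcs c (List.mem_cons_self ..)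
    have hrest : ∀ x ∈ rest, x ∈ ['U','D','R','L','F','B'] :=
      fun x hx => hcs x (List.mem_cons_of_mem _ hx)
    have hmem : ((seen.map (fun c => pvFreeLayerMoves.getD c.toString [])).contains
        (pvFreeLayerMoves.getD c.toString [])) = seen.contains c := by
      by_cases h : c ∈ seen
      · simp [h]
        exact ⟨c, h, rfl⟩
      · simp [h]
        intro x hx hex
        exact h (pv_inj_of_valid (hseen x hx) hc hex ▸ hx)
    simp only [pvLoopA, pv_contains_of_valid hc, if_true, List.foldl_cons, hmem]
    by_cases h : c ∈ seen
    · simpa [PySem.Set.add, PySem.Set.contains_eq_listContains, List.contains_iff_mem, h] using ih seen hrest hseen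
    · have : (seen.map (fun c => pvFreeLayerMoves.getD c.toString [])) ++
          [pvFreeLayerMoves.getD c.toString []]
          = (seen ++ [c]).map (fun c => pvFreeLayerMoves.getD c.toString []) := by
        simp
      simp only [List.contains_iff_mem, h, if_false,
        PySem.Set.add, PySem.Set.contains_eq_listContains, this]
      exact ih (seen ++ [c]) hrest (by
        intro x hx
        rcases List.mem_append.mp hx with hx | hx
        · exact hseen x hx
        · exact List.mem_singleton.mp hx ▸ hc)

-- ===== VERDICT (by name: the statement is the Claim_ definition above) =====
theorem parse_free_layers_py_spec : Claim_equal_parse_free_layers_py := by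
  intro raw _ hpre
  simp only [Pre_parse_free_layers_py, List.all_eq_true, decide_eq_true_eq] at hpre
  unfold Spec_parse_free_layers_py parse_free_layers_py parse_free_layers_py_alt
  set chars := (PySem.Str.upper (PySem.Str.strip raw)).toList with hchars
  have hall : chars.all (fun ch => pvFreeLayerMoves.contains ch.toString) = true := by
    rw [List.all_eq_true]
    exact fun c hc => pv_contains_of_valid (hpre c hc)
  have hA := pv_loopA_eq chars [] hpre (by intro c hc; simp at hc)
  simp only [List.map_nil] at hA
  rw [if_pos hall, hA, Option.getD_some, PySem.List.dedup_eq_ofList, PySem.Set.ofList_eq_foldl]
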